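-- pv_equiv track=rewrite | github.com/sasdf/ctf | writeup/2019/plaid/rev/bigmaffs/_files/code.py | _fromInt
-- ===== SOURCE A (Python) =====
-- def _fromInt(e, size):
--     c = e >> (size * 8)
--     ee = e - (c << (size * 8))
--     if ee > 0:
--         M = 0
--         for i in range(size):
--             M = M * 256 + 85
--         if M < ee:
--             c += 1
--             ee -= 1 << (size * 8)
--     else:
--         M = 0
--         for i in range(size):
--             M = M * 256 -170
--         if M > ee:
--             c -= 1
--             ee += 1 << (size * 8)
--     if size == 0:
--         return [c]
--     else:
--         return _fromInt(ee, size - 1) + [c]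
-- ===== SOURCE B (Python) =====
-- def _fromInt(e, size):
--     # One bottom-up pass: split off the low size*8 bits, emit balanced
--     # base-256 digits least-significant first with a single carry bit,
--     # then the (unbounded) top digit absorbs the carry.
--     low = e % (1 << (size * 8))
--     out = []
--     carry = 0
--     for b in low.to_bytes(size, 'little'):
--         v = b + carry
--         if v > 85:
--             v -= 256
--             carry = 1
--         else:
--             carry = 0
--         out.append(v)
--     out.append((e >> (size * 8)) + carry)
--     return out
-- ===== Notes on version B (the rewrite author's own statement) =====
-- stated objective: faster
-- what changed: A recursively peels the most-significant digit, rebuilding the 0x55...55 threshold with a fresh Python loop at every recursion level; B makes a single least-significant-first pass over the low size bytes (via to_bytes) propagating a one-bit carry, with no recursion and no threshold loops.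
import Mathlib
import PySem

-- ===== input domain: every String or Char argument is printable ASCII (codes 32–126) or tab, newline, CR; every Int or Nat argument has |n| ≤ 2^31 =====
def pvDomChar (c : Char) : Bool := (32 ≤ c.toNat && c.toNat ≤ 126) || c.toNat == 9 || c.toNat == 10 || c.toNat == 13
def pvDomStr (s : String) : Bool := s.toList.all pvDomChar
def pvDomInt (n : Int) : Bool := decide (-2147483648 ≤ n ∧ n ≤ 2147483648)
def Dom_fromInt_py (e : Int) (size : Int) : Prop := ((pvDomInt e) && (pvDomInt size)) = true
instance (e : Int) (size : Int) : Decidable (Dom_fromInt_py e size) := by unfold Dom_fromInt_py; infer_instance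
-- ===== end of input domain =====

-- B replaces A's recursion (which rebuilds the 0x55…55 bound by a fresh loop at every
-- level) by a single least-significant-first pass over the low bytes with a carry bit.

-- ===== PORT A =====
-- literal transliteration of _fromInt; the recursion test is `size ≤ 0` instead of
-- `size == 0` only for totality (Python raises ValueError on the negative shift when
-- size < 0, which Pre_ excludes; for size ≥ 0 the test is identical)
def fromInt_py (e : Int) (size : Int) : List Int :=
  let c := e >>> (size * 8).toNat
  let ee := e - (c <<< (size * 8).toNat)
  let p :=
    if ee > 0 then
      let M := (PySem.List.pyRange 0 size 1).foldl (fun M _ => M * 256 + 85) 0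
      if M < ee then (c + 1, ee - ((1:Int) <<< (size * 8).toNat)) else (c, ee)
    else
      let M := (PySem.List.pyRange 0 size 1).foldl (fun M _ => M * 256 - 170) 0
      if M > ee then (c - 1, ee + ((1:Int) <<< (size * 8).toNat)) else (c, ee)
  if size ≤ 0 then [p.1]
  else fromInt_py p.2 (size - 1) ++ [p.1]
termination_by size.toNat
decreasing_by simp only [not_le] at *; omega

-- ===== PORT B =====
-- exact hand port of `low.to_bytes(size, 'little')` for 0 ≤ low < 256^size
def pyToBytesLE (x : Int) : Nat → List Int
  | 0 => []
  | n + 1 => x % 256 :: pyToBytesLE (x / 256) n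

-- the `for b in …` loop of Source B: same per-byte state (out, carry), front to back
def balPass : List Int → Int → List Int × Int
  | [], carry => ([], carry)
  | b :: rest, carry =>
    let v := b + carry
    if v > 85 then
      let r := balPass rest 1
      ((v - 256) :: r.1, r.2)
    else
      let r := balPass rest 0
      (v :: r.1, r.2)

def fromInt_py_alt (e : Int) (size : Int) : List Int :=
  let low := PySem.Int.mod e ((1:Int) <<< (size * 8).toNat)
  let r := balPass (pyToBytesLE low size.toNat) 0
  r.1 ++ [(e >>> (size * 8).toNat) + r.2]

-- ===== PRECONDITION & SPEC =====
-- Python raises ValueError (negative shift count) when size < 0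
def Pre_fromInt_py (e : Int) (size : Int) : Prop := 0 ≤ size
instance (e : Int) (size : Int) : Decidable (Pre_fromInt_py e size) := by
  unfold Pre_fromInt_py; infer_instance
def pvWitness_fromInt_py : Int × Int := (12345, 2)

def Spec_fromInt_py (e : Int) (size : Int) (out : List Int) : Prop := out = fromInt_py_alt e size
instance (e : Int) (size : Int) (out : List Int) : Decidable (Spec_fromInt_py e size out) := by unfold Spec_fromInt_py; infer_instance

-- ===== CLAIM (what is proved, stated in full; the proofs are below) =====
def Claim_equal_fromInt_py : Prop := ∀ (e : Int) (size : Int), Dom_fromInt_py e size → Pre_fromInt_py e size → Spec_fromInt_py e size (fromInt_py e size)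

-- ===== LEMMAS AND PROOFS =====

-- value of a little-endian base-256 digit list
def val256 : List Int → Int
  | [] => 0
  | d :: t => d + 256 * val256 t

-- every digit except the last lies in the balanced range [-170, 85]
def OkTail : List Int → Prop
  | [] => True
  | [_] => True
  | d :: t => (-170 ≤ d ∧ d ≤ 85) ∧ OkTail t

lemma val256_append (L : List Int) (c : Int) :
    val256 (L ++ [c]) = val256 L + 256 ^ L.length * c := by
  induction L with
  | nil => simp [val256]
  | cons d t ih => simp [val256, ih, pow_succ]; ring

lemma okTail_append (L : List Int) (c : Int)
    (h : ∀ d ∈ L, -170 ≤ d ∧ d ≤ 85) : OkTail (L ++ [c]) := by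
  induction L with
  | nil => simp [OkTail]
  | cons d t ih =>
    cases t with
    | nil => exact ⟨h d (by simp), by simp [OkTail]⟩
    | cons x t' =>
      exact ⟨h d (by simp), ih (fun y hy => h y (by simp [hy]))⟩

-- a value has at most one digit list of a given length whose non-top digits are balanced
lemma uniq256 : ∀ (L1 L2 : List Int), L1.length = L2.length →
    OkTail L1 → OkTail L2 → val256 L1 = val256 L2 → L1 = L2 := by
  intro L1
  induction L1 with
  | nil => intro L2 hl _ _ _; cases L2 <;> simp_all
  | cons d1 t1 ih =>
    intro L2 hl h1 h2 hv
    cases L2 with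
    | nil => simp at hl
    | cons d2 t2 =>
      cases t1 with
      | nil =>
        cases t2 with
        | nil => simp only [val256] at hv; simp at hv ⊢; omega
        | cons _ _ => simp at hl
      | cons x1 t1' =>
        cases t2 with
        | nil => simp at hl
        | cons x2 t2' =>
          obtain ⟨hb1, ho1⟩ := h1
          obtain ⟨hb2, ho2⟩ := h2
          have hv' : d1 + 256 * val256 (x1 :: t1') = d2 + 256 * val256 (x2 :: t2') := hv
          have hd : d1 = d2 ∧ val256 (x1 :: t1') = val256 (x2 :: t2') := by omega
          have := ih (x2 :: t2') (by simpa using hl) ho1 ho2 hd.2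
          simp [hd.1, this]

-- the two loop bounds of A: 3·M⁺(n) = 256^n - 1 and 3·M⁻(n) = -2·(256^n - 1)
lemma foldM_pos (n : Nat) :
    3 * ((PySem.List.pyRange 0 (n : Int) 1).foldl (fun M _ => M * 256 + 85) 0) =
      (256:Int) ^ n - 1 := by
  induction n with
  | zero => simp
  | succ m ih =>
    rw [show ((m + 1 : Nat) : Int) = (m : Int) + 1 by push_cast; ring,
      PySem.List.pyRange_one_succ_right (a := 0) (b := (m : Int)) (by positivity),
      List.foldl_append]
    simp only [List.foldl]
    rw [pow_succ]
    linarith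

lemma foldM_neg (n : Nat) :
    3 * ((PySem.List.pyRange 0 (n : Int) 1).foldl (fun M _ => M * 256 - 170) 0) =
      -2 * ((256:Int) ^ n - 1) := by
  induction n with
  | zero => simp
  | succ m ih =>
    rw [show ((m + 1 : Nat) : Int) = (m : Int) + 1 by push_cast; ring,
      PySem.List.pyRange_one_succ_right (a := 0) (b := (m : Int)) (by positivity),
      List.foldl_append]
    simp only [List.foldl]
    rw [pow_succ]
    linarith

lemma shiftR (e : Int) (k : Nat) : e >>> k = e / 2 ^ k := by
  rw [Int.shiftRight_eq_div_pow]; push_cast; ring_nf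

lemma shiftL (c : Int) (k : Nat) : c <<< k = c * 2 ^ k := by
  rw [Int.shiftLeft_eq]

lemma pow_bytes (n : Nat) : (2 : Int) ^ (8 * n) = 256 ^ n := by
  rw [pow_mul]; norm_num

-- A at size 0 returns the input as the single digit
lemma A_zero (e : Int) : fromInt_py e 0 = [e] := by
  rw [fromInt_py]
  norm_num [shiftR, shiftL]

-- one unfolding of A at size n+1: it splits e into a balanced remainder and a top digit
lemma A_step (n : Nat) (e : Int) :
    ∃ c ee, fromInt_py e ((n + 1 : Nat) : Int) = fromInt_py ee (n : Int) ++ [c] ∧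
      e = c * 256 ^ (n + 1) + ee ∧
      3 * ee ≤ 256 ^ (n + 1) - 1 ∧ -2 * (256 ^ (n + 1) - 1) ≤ 3 * ee := by
  have hP : (0:Int) < 256 ^ (n + 1) := by positivity
  have hA : (1:Int) ≤ 256 ^ n := by
    have := pow_pos (show (0:Int) < 256 by norm_num) n; omega
  have hPS : (256:Int) ^ (n + 1) = 256 ^ n * 256 := pow_succ 256 n
  have hk : ((((n + 1 : Nat)) : Int) * 8).toNat = 8 * (n + 1) := by push_cast; omega
  have hpos : ¬ (((n + 1 : Nat) : Int) ≤ 0) := by push_cast; omega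
  have hn1 : ((n + 1 : Nat) : Int) - 1 = (n : Int) := by push_cast; ring
  have hMp := foldM_pos (n + 1)
  have hMn := foldM_neg (n + 1)
  rw [fromInt_py]
  simp only [hk, shiftR, shiftL, pow_bytes, one_mul, if_neg hpos, hn1]
  have hmod : e - e / 256 ^ (n + 1) * 256 ^ (n + 1) = e % 256 ^ (n + 1) := by
    rw [Int.emod_def]; ring
  rw [hmod]
  have h0 : 0 ≤ e % 256 ^ (n + 1) := Int.emod_nonneg e (ne_of_gt hP)
  have h1 : e % 256 ^ (n + 1) < 256 ^ (n + 1) := Int.emod_lt_of_pos e hP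
  have hqr : 256 ^ (n + 1) * (e / 256 ^ (n + 1)) + e % 256 ^ (n + 1) = e :=
    Int.ediv_add_emod e _
  split_ifs with hrp hlt hgt
  · exact ⟨e / 256 ^ (n + 1) + 1, e % 256 ^ (n + 1) - 256 ^ (n + 1),
      rfl, by linarith, by omega, by omega⟩
  · exact ⟨e / 256 ^ (n + 1), e % 256 ^ (n + 1), rfl, by linarith, by omega, by omega⟩
  · exact absurd hgt (by omega)
  · exact ⟨e / 256 ^ (n + 1), e % 256 ^ (n + 1), rfl, by linarith, by omega, by omega⟩

-- characterisation of port A: length, value, digit bounds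
lemma A_char : ∀ (n : Nat) (e : Int),
    (fromInt_py e (n : Int)).length = n + 1 ∧
    val256 (fromInt_py e (n : Int)) = e ∧
    OkTail (fromInt_py e (n : Int)) ∧
    (3 * e ≤ 256 ^ (n + 1) - 1 → -2 * (256 ^ (n + 1) - 1) ≤ 3 * e →
      ∀ d ∈ fromInt_py e (n : Int), -170 ≤ d ∧ d ≤ 85) := by
  intro n
  induction n with
  | zero =>
    intro e
    rw [show ((0 : Nat) : Int) = 0 by norm_num, A_zero]
    refine ⟨by simp, by simp [val256], by simp [OkTail], ?_⟩
    intro h1 h2 d hd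
    simp at hd
    subst hd
    norm_num at h1 h2
    omega
  | succ m ih =>
    intro e
    obtain ⟨c, ee, heq, hsum, hub, hlb⟩ := A_step m e
    obtain ⟨ihl, ihv, iho, ihb⟩ := ih ee
    have hball : ∀ d ∈ fromInt_py ee (m : Int), -170 ≤ d ∧ d ≤ 85 := ihb hub hlb
    rw [heq]
    refine ⟨by simp [ihl], ?_, okTail_append _ _ hball, ?_⟩
    · rw [val256_append, ihl, ihv]
      linarith [hsum]
    · intro h1 h2 d hd
      rw [List.mem_append] at hd
      rcases hd with hd | hd
      · exact hball d hd
      · -- the top digit c is bounded too, from e = c·256^(m+1) + ee and the ranges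
        have hP : (0:Int) < 256 ^ (m + 1) := by positivity
        have hPP : (256:Int) ^ (m + 1 + 1) = 256 ^ (m + 1) * 256 := pow_succ 256 (m+1)
        rw [hPP] at h1 h2
        have hcb : -170 ≤ c ∧ c ≤ 85 := by
          constructor
          · by_contra hcon
            have hcc : c ≤ -171 := by omega
            have : c * 256 ^ (m+1) ≤ -171 * 256 ^ (m+1) :=
              mul_le_mul_of_nonneg_right hcc (le_of_lt hP)
            nlinarith
          · by_contra hcon
            have hcc : 86 ≤ c := by omega
            have : 86 * 256 ^ (m+1) ≤ c * 256 ^ (m+1) :=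
              mul_le_mul_of_nonneg_right hcc (le_of_lt hP)
            nlinarith
        simp at hd
        omega

-- the byte list of `low.to_bytes(size, 'little')`: length, byte bounds, value
lemma bytes_spec : ∀ (n : Nat) (x : Int), 0 ≤ x → x < 256 ^ n →
    (pyToBytesLE x n).length = n ∧ (∀ b ∈ pyToBytesLE x n, 0 ≤ b ∧ b ≤ 255) ∧
    val256 (pyToBytesLE x n) = x := by
  intro n
  induction n with
  | zero =>
    intro x h0 h1
    norm_num [pyToBytesLE, val256] at *
    omega
  | succ m ih =>
    intro x h0 h1
    have hp : (256:Int) ^ (m + 1) = 256 ^ m * 256 := pow_succ 256 m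
    have hq0 : 0 ≤ x / 256 := by omega
    have hq1 : x / 256 < 256 ^ m := by omega
    obtain ⟨il, ib, iv⟩ := ih (x / 256) hq0 hq1
    refine ⟨by simp [pyToBytesLE, il], ?_, ?_⟩
    · intro b hb
      simp only [pyToBytesLE, List.mem_cons] at hb
      rcases hb with hb | hb
      · omega
      · exact ib b hb
    · simp only [pyToBytesLE, val256, iv]
      omega

-- the carry pass of B over bounded bytes
lemma balPass_spec : ∀ (bs : List Int) (carry : Int),
    (∀ b ∈ bs, 0 ≤ b ∧ b ≤ 255) → (carry = 0 ∨ carry = 1) →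
    (balPass bs carry).1.length = bs.length ∧
    ((balPass bs carry).2 = 0 ∨ (balPass bs carry).2 = 1) ∧
    (∀ d ∈ (balPass bs carry).1, -170 ≤ d ∧ d ≤ 85) ∧
    val256 (balPass bs carry).1 + 256 ^ bs.length * (balPass bs carry).2 =
      val256 bs + carry := by
  intro bs
  induction bs with
  | nil =>
    intro carry _ hc
    exact ⟨by simp [balPass], by simpa [balPass] using hc,
      by simp [balPass], by simp [balPass, val256]⟩
  | cons b rest ih =>
    intro carry hb hc
    have hbb := hb b (by simp)
    have hrest : ∀ y ∈ rest, 0 ≤ y ∧ y ≤ 255 := fun y hy => hb y (by simp [hy])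
    simp only [balPass]
    split_ifs with hv
    · obtain ⟨il, i2, ibd, iv⟩ := ih 1 hrest (Or.inr rfl)
      refine ⟨by simp [il], i2, ?_, ?_⟩
      · intro d hd
        rcases List.mem_cons.mp hd with hd | hd
        · omega
        · exact ibd d hd
      · simp only [val256, List.length_cons, pow_succ]
        rcases i2 with h | h <;> rw [h] at iv ⊢ <;> linarith
    · obtain ⟨il, i2, ibd, iv⟩ := ih 0 hrest (Or.inl rfl)
      refine ⟨by simp [il], i2, ?_, ?_⟩
      · intro d hd
        rcases List.mem_cons.mp hd with hd | hd
        · omega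
        · exact ibd d hd
      · simp only [val256, List.length_cons, pow_succ]
        rcases i2 with h | h <;> rw [h] at iv ⊢ <;> linarith

-- characterisation of port B: length, value, digit bounds
lemma B_char : ∀ (n : Nat) (e : Int),
    (fromInt_py_alt e (n : Int)).length = n + 1 ∧
    val256 (fromInt_py_alt e (n : Int)) = e ∧
    OkTail (fromInt_py_alt e (n : Int)) := by
  intro n e
  have hk : (((n : Nat) : Int) * 8).toNat = 8 * n := by omega
  have hP : (0:Int) < 256 ^ n := by positivity
  have hnn : (((n : Nat) : Int)).toNat = n := by omega
  unfold fromInt_py_alt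
  simp only [hk, hnn, shiftL, shiftR, pow_bytes, one_mul,
    PySem.Int.mod_eq_emod_of_pos hP]
  have h0 : 0 ≤ e % 256 ^ n := Int.emod_nonneg e (by positivity)
  have h1 : e % 256 ^ n < 256 ^ n := Int.emod_lt_of_pos e hP
  obtain ⟨bl, bb, bv⟩ := bytes_spec n (e % 256 ^ n) h0 h1
  obtain ⟨pl, p2, pbd, pv⟩ := balPass_spec (pyToBytesLE (e % 256 ^ n) n) 0 bb (Or.inl rfl)
  rw [bl] at pl pv
  refine ⟨by simp [pl], ?_, okTail_append _ _ pbd⟩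
  rw [val256_append, pl]
  rw [bv] at pv
  have hme := Int.emod_add_ediv e (256 ^ n)
  linear_combination pv + hme

-- ===== VERDICT (by name: the statement is the Claim_ definition above) =====
theorem fromInt_py_spec : Claim_equal_fromInt_py := by
  intro e size _ hpre
  have hsz : size = (size.toNat : Int) := (Int.toNat_of_nonneg hpre).symm
  unfold Spec_fromInt_py
  rw [hsz]
  obtain ⟨la, va, oa, _⟩ := A_char size.toNat e
  obtain ⟨lb, vb, ob⟩ := B_char size.toNat e
  exact uniq256 _ _ (by omega) oa ob (by omega)
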